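-- pv_equiv track=rewrite | github.com/pokerdio/generic | e/e-303.py | gen_three
-- ===== SOURCE A (Python) =====
-- from itertools import product as prod
--
-- def gen_three(first, n):
--     """gens n-digit numbers with digitz 0-2 starting with first"""
--     base = first * 10 ** (n - 1)
--     for p in prod(*((0, 1, 2),) * (n - 1)):
--         ret = 0
--         for x in p:
--             ret *= 10
--             ret += x
--         yield ret + base
-- ===== SOURCE B (Python) =====
-- def gen_three(first, n):
--     """gens n-digit numbers with digitz 0-2 starting with first"""
--     base = first * 10 ** (n - 1)
--     nums = [0]
--     for _ in range(n - 1):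
--         nums = [10 * v + d for v in nums for d in (0, 1, 2)]
--     for v in nums:
--         yield v + base
-- ===== Notes on version B (the rewrite author's own statement) =====
-- stated objective: alternative
-- what changed: Replaces itertools.product tuple enumeration plus a per-tuple digit fold with a single incremental pass that builds the decimal values directly, extending each value by one least-significant digit per round (no tuples materialised).
-- outside the precondition, e.g. on gen_three(1, 0): A returns [0.1], B returns [0.1]
import Mathlib
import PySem

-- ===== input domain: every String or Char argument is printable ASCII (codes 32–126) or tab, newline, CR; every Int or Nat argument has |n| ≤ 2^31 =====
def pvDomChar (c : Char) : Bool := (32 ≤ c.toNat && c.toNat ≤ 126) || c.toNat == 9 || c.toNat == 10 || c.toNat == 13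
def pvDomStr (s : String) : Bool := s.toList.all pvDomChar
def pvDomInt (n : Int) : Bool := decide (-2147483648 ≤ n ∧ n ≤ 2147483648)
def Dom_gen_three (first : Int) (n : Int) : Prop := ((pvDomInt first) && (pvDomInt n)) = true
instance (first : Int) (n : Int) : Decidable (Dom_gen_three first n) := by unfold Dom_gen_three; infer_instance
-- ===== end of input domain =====

-- B replaces A's per-tuple itertools.product + digit-fold with one incremental pass that
-- builds the decimal values directly (each pass appends a least-significant digit): objective
-- 'alternative' (no tuples are materialised, each value extends a previous one).


-- ===== PORT A =====
-- itertools.product((0,1,2), … (n-1 copies)) in lexicographic order (first factor outermost);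
-- exact for n ≥ 1 (Pre_), where (n-1).toNat = n-1 and the Python exponent 10**(n-1) is an int.
def pvProdThree : Nat → List (List Int)
  | 0 => [[]]
  | m + 1 => ([0, 1, 2] : List Int).flatMap (fun d => (pvProdThree m).map (fun p => d :: p))

def gen_three (first : Int) (n : Int) : List Int :=
  let base := first * 10 ^ (n - 1).toNat
  (pvProdThree (n - 1).toNat).map (fun p =>
    p.foldl (fun ret x => ret * 10 + x) 0 + base)

-- ===== PORT B =====
-- one pass of B's comprehension: nums = [10 * v + d for v in nums for d in (0, 1, 2)]
def pvStepThree (nums : List Int) : List Int :=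
  nums.flatMap (fun v => ([0, 1, 2] : List Int).map (fun d => 10 * v + d))

def gen_three_alt (first : Int) (n : Int) : List Int :=
  let base := first * 10 ^ (n - 1).toNat
  let nums := (List.range (n - 1).toNat).foldl (fun nums _ => pvStepThree nums) [0]
  nums.map (fun v => v + base)

-- ===== PRECONDITION & SPEC =====
-- Pre_ excludes n ≤ 0, where Python's 10 ** (n - 1) is a float, so A (and B) yield a
-- float rather than a value of the declared integer type.
def Pre_gen_three (first : Int) (n : Int) : Prop := 1 ≤ n
instance (first : Int) (n : Int) : Decidable (Pre_gen_three first n) := by unfold Pre_gen_three; infer_instance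
def pvWitness_gen_three : Int × Int := (2, 3)

def Spec_gen_three (first : Int) (n : Int) (out : List Int) : Prop := out = gen_three_alt first n
instance (first : Int) (n : Int) (out : List Int) : Decidable (Spec_gen_three first n out) := by unfold Spec_gen_three; infer_instance

-- ===== CLAIM (what is proved, stated in full; the proofs are below) =====
def Claim_equal_gen_three : Prop := ∀ (first : Int) (n : Int), Dom_gen_three first n → Pre_gen_three first n → Spec_gen_three first n (gen_three first n)

-- ===== LEMMAS AND PROOFS =====

theorem pvStepThree_append (xs ys : List Int) :
    pvStepThree (xs ++ ys) = pvStepThree xs ++ pvStepThree ys := by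
  simp [pvStepThree]

theorem pvStepThree_iterate_append (m : Nat) (xs ys : List Int) :
    pvStepThree^[m] (xs ++ ys) = pvStepThree^[m] xs ++ pvStepThree^[m] ys := by
  induction m generalizing xs ys with
  | zero => simp
  | succ m ih =>
    simp only [Function.iterate_succ_apply, pvStepThree_append, ih]

-- main bridge: B's iterated pass started from a single seed r equals A's tuple list folded from r
theorem pvStepThree_iterate_eq (m : Nat) (r : Int) :
    pvStepThree^[m] [r] =
      (pvProdThree m).map (fun p => p.foldl (fun ret x => ret * 10 + x) r) := by
  induction m generalizing r with
  | zero => simp [pvProdThree]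
  | succ m ih =>
    have hstep : pvStepThree [r] = [10 * r] ++ [10 * r + 1] ++ [10 * r + 2] := by
      simp [pvStepThree]
    rw [Function.iterate_succ_apply, hstep,
        pvStepThree_iterate_append, pvStepThree_iterate_append, ih, ih, ih]
    simp [pvProdThree, List.flatMap, List.map_map, Function.comp_def, List.foldl_cons,
      mul_comm (10 : Int)]

theorem foldl_range_step (m : Nat) :
    (List.range m).foldl (fun nums _ => pvStepThree nums) [0] = pvStepThree^[m] [0] := by
  induction m with
  | zero => simp
  | succ m ih =>
    rw [List.range_succ, List.foldl_append, ih, List.foldl_cons, List.foldl_nil]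
    exact (Function.iterate_succ_apply' _ _ _).symm

-- ===== VERDICT (by name: the statement is the Claim_ definition above) =====
theorem gen_three_spec : Claim_equal_gen_three := by
  intro _first n _ _
  unfold Spec_gen_three gen_three gen_three_alt
  rw [foldl_range_step, pvStepThree_iterate_eq]
  simp [List.map_map, Function.comp_def]
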